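-- pv_equiv track=rewrite | github.com/jlfzzz/algorithms | others/3000-3100/3082. 求出所有子序列的能量和.py | sumOfPower
-- ===== SOURCE A (Python) =====
-- from typing import List
--
-- MOD = int(1e9 + 7)
--
-- def sumOfPower(nums: List[int], k: int) -> int:
--     n = len(nums)
--     dp = [[0] * (k + 1) for _ in range(n + 1)]
--     dp[0][0] = 1
--
--     for i in range(1, n + 1):
--         for j in range(k + 1):
--             dp[i][j] = (dp[i - 1][j] * 2) % MOD
--             if j >= nums[i - 1]:
--                 dp[i][j] = (dp[i][j] + dp[i - 1][j - nums[i - 1]]) % MOD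
--
--     return dp[n][k]
-- ===== SOURCE B (Python) =====
-- from typing import List
--
-- MOD = int(1e9 + 7)
--
-- def sumOfPower(nums: List[int], k: int) -> int:
--     memo = {}
--
--     def f(i: int, j: int) -> int:
--         if i == 0:
--             return 1 if j == 0 else 0
--         key = (i, j)
--         if key not in memo:
--             x = nums[i - 1]
--             if j >= x:
--                 memo[key] = (2 * f(i - 1, j) + f(i - 1, j - x)) % MOD
--             else:
--                 memo[key] = (2 * f(i - 1, j)) % MOD
--         return memo[key]
--
--     return f(len(nums), k)
-- ===== Notes on version B (the rewrite author's own statement) =====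
-- stated objective: alternative
-- what changed: Replaces the bottom-up (n+1)x(k+1) table with a top-down memoized recursion f(i,j) over the element index, storing only reachable states in a dict.
import Mathlib
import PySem

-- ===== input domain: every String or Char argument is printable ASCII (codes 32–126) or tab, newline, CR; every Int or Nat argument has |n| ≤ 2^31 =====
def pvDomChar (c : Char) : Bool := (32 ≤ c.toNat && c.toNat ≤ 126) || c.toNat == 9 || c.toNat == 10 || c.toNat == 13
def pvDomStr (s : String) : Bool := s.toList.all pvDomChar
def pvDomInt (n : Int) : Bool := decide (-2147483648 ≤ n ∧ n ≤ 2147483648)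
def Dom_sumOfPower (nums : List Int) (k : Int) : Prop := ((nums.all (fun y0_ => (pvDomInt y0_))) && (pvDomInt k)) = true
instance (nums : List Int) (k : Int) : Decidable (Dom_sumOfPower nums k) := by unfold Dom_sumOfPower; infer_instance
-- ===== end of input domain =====

-- B replaces A's bottom-up (n+1)x(k+1) table with a top-down recursion over the
-- element index (memoized in Python; the memo only caches f's values, so the
-- port is the plain recursion). Equivalence of return values on Pre_ is proved.

def pvMOD : Int := 1000000007

-- ===== PORT A =====
-- dp is modelled as the list of computed rows (row i appended at step i); all
-- indices are in range under Pre_, so the total pyGetD/pySetD forms are exact.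
def sumOfPower (nums : List Int) (k : Int) : Int :=
  let n := nums.length
  let row0 : List Int := PySem.List.pySetD (List.replicate (k + 1).toNat 0) 0 1
  let dp : List (List Int) :=
    (PySem.List.pyRange 1 ((n : Int) + 1) 1).foldl
      (fun dp i =>
        let prev := PySem.List.pyGetD dp (i - 1) []
        let x := PySem.List.pyGetD nums (i - 1) 0
        dp ++ [(PySem.List.pyRange 0 (k + 1) 1).map (fun j =>
          let v := PySem.Int.mod (PySem.List.pyGetD prev j 0 * 2) pvMOD
          if j ≥ x then PySem.Int.mod (v + PySem.List.pyGetD prev (j - x) 0) pvMOD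
          else v)])
      [row0]
  PySem.List.pyGetD (PySem.List.pyGetD dp (n : Int) []) k 0

-- ===== PORT B =====
-- f(i, j) of Source B; the dict memo caches f's values, so the faithful functional
-- port is the recursion itself.
def pvF (nums : List Int) : Nat → Int → Int
  | 0, j => if j = 0 then 1 else 0
  | i + 1, j =>
    let x := nums.getD i 0
    if j ≥ x then PySem.Int.mod (2 * pvF nums i j + pvF nums i (j - x)) pvMOD
    else PySem.Int.mod (2 * pvF nums i j) pvMOD

def sumOfPower_alt (nums : List Int) (k : Int) : Int :=
  pvF nums nums.length k

-- ===== PRECONDITION & SPEC =====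
-- Pre_ is exactly where the Python A returns: with k < 0 the rows are empty and
-- dp[0][0] = 1 raises IndexError; with a negative element x, dp[i-1][j - x] is
-- read at index j - x > k for j near k and raises IndexError.
def Pre_sumOfPower (nums : List Int) (k : Int) : Prop :=
  0 ≤ k ∧ ∀ x ∈ nums, 0 ≤ x
instance (nums : List Int) (k : Int) : Decidable (Pre_sumOfPower nums k) := by
  unfold Pre_sumOfPower; infer_instance

def pvWitness_sumOfPower : List Int × Int := ([1, 2, 3], 3)

def Spec_sumOfPower (nums : List Int) (k : Int) (out : Int) : Prop := out = sumOfPower_alt nums k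
instance (nums : List Int) (k : Int) (out : Int) : Decidable (Spec_sumOfPower nums k out) := by unfold Spec_sumOfPower; infer_instance

-- ===== CLAIM (what is proved, stated in full; the proofs are below) =====
def Claim_equal_sumOfPower : Prop := ∀ (nums : List Int) (k : Int), Dom_sumOfPower nums k → Pre_sumOfPower nums k → Spec_sumOfPower nums k (sumOfPower nums k)

-- ===== LEMMAS AND PROOFS =====

-- row t of A's table, expressed through B's recursion
def pvRow (nums : List Int) (k : Int) (t : Nat) : List Int :=
  (PySem.List.pyRange 0 (k + 1) 1).map (pvF nums t)

lemma pv_mod_mod_add (a b : Int) :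
    PySem.Int.mod (PySem.Int.mod a pvMOD + b) pvMOD = PySem.Int.mod (a + b) pvMOD := by
  simp only [PySem.Int.mod_eq_emod_of_pos (show (0:Int) < pvMOD by norm_num [pvMOD])]
  exact Int.emod_add_emod a pvMOD b

lemma pv_row0 (nums : List Int) (k : Int) :
    PySem.List.pySetD (List.replicate (k + 1).toNat 0) 0 1 = pvRow nums k 0 := by
  rw [PySem.List.pySetD_of_nonneg _ _ le_rfl]
  apply List.ext_getElem
  · simp [pvRow, PySem.List.length_pyRange_one]
  · intro t h1 h2
    simp only [pvRow, List.getElem_map, PySem.List.getElem_pyRange_one, List.getElem_set,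
      List.getElem_replicate, pvF, Int.toNat_zero, zero_add]
    rcases Nat.eq_zero_or_pos t with ht | ht
    · subst ht; simp
    · rw [if_neg (by omega), if_neg (by exact_mod_cast by omega)]

lemma pv_step (nums : List Int) (k : Int) (t : Nat)
    (hx : 0 ≤ nums.getD t 0) :
    ((PySem.List.pyRange 0 (k + 1) 1).map (fun j =>
      if j ≥ nums.getD t 0 then
        PySem.Int.mod (PySem.Int.mod (PySem.List.pyGetD (pvRow nums k t) j 0 * 2) pvMOD
          + PySem.List.pyGetD (pvRow nums k t) (j - nums.getD t 0) 0) pvMOD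
      else PySem.Int.mod (PySem.List.pyGetD (pvRow nums k t) j 0 * 2) pvMOD))
    = pvRow nums k (t + 1) := by
  unfold pvRow
  apply List.map_congr_left
  intro j hj
  rw [PySem.List.mem_pyRange_one] at hj
  rw [PySem.List.pyGetD_map_pyRange_of_nonneg _ _ _ _ hj.1 hj.2]
  by_cases hge : j ≥ nums.getD t 0
  · rw [if_pos hge,
      PySem.List.pyGetD_map_pyRange_of_nonneg _ _ _ _ (by omega) (by omega)]
    simp only [pvF, if_pos hge, pv_mod_mod_add]
    ring_nf
  · rw [if_neg hge]
    simp only [pvF, if_neg hge]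
    ring_nf

lemma pv_fold_inv (nums : List Int) (k : Int) (hx : ∀ x ∈ nums, 0 ≤ x)
    (m : Nat) (hm : m ≤ nums.length) :
    (PySem.List.pyRange 1 ((m : Int) + 1) 1).foldl
      (fun dp i =>
        dp ++ [(PySem.List.pyRange 0 (k + 1) 1).map (fun j =>
          if j ≥ PySem.List.pyGetD nums (i - 1) 0 then
            PySem.Int.mod (PySem.Int.mod
                (PySem.List.pyGetD (PySem.List.pyGetD dp (i - 1) []) j 0 * 2) pvMOD
              + PySem.List.pyGetD (PySem.List.pyGetD dp (i - 1) [])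
                  (j - PySem.List.pyGetD nums (i - 1) 0) 0) pvMOD
          else PySem.Int.mod
            (PySem.List.pyGetD (PySem.List.pyGetD dp (i - 1) []) j 0 * 2) pvMOD)])
      [pvRow nums k 0]
    = (List.range (m + 1)).map (pvRow nums k) := by
  induction m with
  | zero => simp [PySem.List.pyRange_one_eq_nil (le_refl (1 : Int))]
  | succ m ih =>
    have hm' : m ≤ nums.length := by omega
    have hcast : ((m + 1 : Nat) : Int) + 1 = ((m : Int) + 1) + 1 := by push_cast; ring
    have hsplit : PySem.List.pyRange 1 ((m : Int) + 1 + 1) 1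
        = PySem.List.pyRange 1 ((m : Int) + 1) 1 ++ [(m : Int) + 1] :=
      PySem.List.pyRange_one_succ_right (by omega)
    rw [hcast, hsplit, List.foldl_append, ih hm']
    simp only [List.foldl_cons, List.foldl_nil]
    have h1 : ((m : Int) + 1 - 1) = (m : Nat) := by omega
    rw [h1, PySem.List.pyGetD_natCast, PySem.List.pyGetD_natCast,
      PySem.List.getD_map_range _ _ _ _ (by omega)]
    have hmem : nums.getD m 0 ∈ nums := by
      rw [List.getD_eq_getElem _ _ (by omega)]; exact List.getElem_mem _
    rw [pv_step nums k m (hx _ hmem)]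
    rw [List.range_succ (n := m + 1), List.range_succ (n := m)]
    simp

-- ===== VERDICT (by name: the statement is the Claim_ definition above) =====
theorem sumOfPower_spec : Claim_equal_sumOfPower := by
  intro nums k _ hpre
  obtain ⟨hk, hx⟩ := hpre
  show sumOfPower nums k = sumOfPower_alt nums k
  simp only [sumOfPower, sumOfPower_alt]
  rw [pv_row0 nums k, pv_fold_inv nums k hx nums.length le_rfl,
    PySem.List.pyGetD_natCast, PySem.List.getD_map_range _ _ _ _ (Nat.lt_succ_self _)]
  exact PySem.List.pyGetD_map_pyRange_of_nonneg _ _ _ _ hk (by omega)
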